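-- pv_equiv track=rewrite | github.com/LucasSikora/Slave-Narratives | Project Files/CSV_Cleaner.py | fix_punctuation
-- ===== SOURCE A (Python) =====
-- def fix_punctuation(text):
--     fixed_text = ""
--     for i in range(len(text)):
--         if i < len(text) - 1 and text[i].isalpha() and text[i + 1] in ",.?!":
--             fixed_text += text[i] + " "
--         else:
--             fixed_text += text[i]
--     return fixed_text
-- ===== SOURCE B (Python) =====
-- def fix_punctuation(text):
--     out = text
--     for i in range(len(text) - 1, 0, -1):
--         if text[i] in ",.?!" and text[i - 1].isalpha():
--             out = out[:i] + " " + out[i:]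
--     return out
-- ===== Notes on version B (the rewrite author's own statement) =====
-- stated objective: faster
-- what changed: Instead of A's forward pass that rebuilds the string character by character, B scans backwards over punctuation positions and splices a space in by slicing (out[:i] + ' ' + out[i:]) only at each letter-punctuation boundary, leaving the rest of the string untouched.
import Mathlib
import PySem

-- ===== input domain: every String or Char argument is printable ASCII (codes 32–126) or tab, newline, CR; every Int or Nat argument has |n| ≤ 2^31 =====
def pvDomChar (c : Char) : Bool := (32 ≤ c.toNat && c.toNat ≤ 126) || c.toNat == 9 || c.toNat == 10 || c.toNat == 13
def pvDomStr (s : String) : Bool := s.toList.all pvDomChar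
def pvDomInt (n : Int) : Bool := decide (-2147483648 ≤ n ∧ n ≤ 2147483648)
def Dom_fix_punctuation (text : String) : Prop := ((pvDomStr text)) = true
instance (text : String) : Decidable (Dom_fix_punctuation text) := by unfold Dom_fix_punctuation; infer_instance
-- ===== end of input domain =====

-- B is an alternative algorithm: instead of A's forward character-by-character rebuild, it
-- scans backwards for punctuation positions and splices a space in by slicing at each one.

-- membership of one character in the literal string ",.?!" (exact for single chars)
def pvPunct (c : Char) : Bool := c == ',' || c == '.' || c == '?' || c == '!'

-- ===== PORT A =====
def fix_punctuation (text : String) : String :=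
  let cs := text.toList
  let fixed := (PySem.List.pyRange 0 (cs.length : Int) 1).foldl (fun acc i =>
    if i < (cs.length : Int) - 1
        ∧ PySem.Chars.isalpha (PySem.List.pyGetD cs i ' ') = true
        ∧ pvPunct (PySem.List.pyGetD cs (i + 1) ' ') = true then
      acc ++ [PySem.List.pyGetD cs i ' ', ' ']
    else
      acc ++ [PySem.List.pyGetD cs i ' ']) []
  String.mk fixed

-- ===== PORT B =====
def fix_punctuation_alt (text : String) : String :=
  let cs := text.toList
  let out := (PySem.List.pyRange ((cs.length : Int) - 1) 0 (-1)).foldl (fun acc i =>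
    if pvPunct (PySem.List.pyGetD cs i ' ') = true
        ∧ PySem.Chars.isalpha (PySem.List.pyGetD cs (i - 1) ' ') = true then
      PySem.List.slice acc none (some i) ++ [' '] ++ PySem.List.slice acc (some i) none
    else acc) cs
  String.mk out

-- ===== PRECONDITION & SPEC =====
def Spec_fix_punctuation (text : String) (out : String) : Prop := out = fix_punctuation_alt text
instance (text : String) (out : String) : Decidable (Spec_fix_punctuation text out) := by unfold Spec_fix_punctuation; infer_instance

-- ===== CLAIM (what is proved, stated in full; the proofs are below) =====
def Claim_equal_fix_punctuation : Prop := ∀ (text : String), Dom_fix_punctuation text → Spec_fix_punctuation text (fix_punctuation text)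

-- ===== LEMMAS AND PROOFS =====

-- common recursive characterisation of the result
def pvSpec : List Char → List Char
  | [] => []
  | [c] => [c]
  | c :: n :: rest =>
      (if PySem.Chars.isalpha c && pvPunct n then [c, ' '] else [c]) ++ pvSpec (n :: rest)

-- the fixed-up tail after a given previous character
def pvG (prev : Char) : List Char → List Char
  | [] => []
  | c :: t => (if PySem.Chars.isalpha prev && pvPunct c then [' ', c] else [c]) ++ pvG c t

theorem pvSpec_cons (c : Char) (t : List Char) : pvSpec (c :: t) = c :: pvG c t := by
  induction t generalizing c with
  | nil => simp [pvSpec, pvG]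
  | cons n rest ih =>
    rw [pvSpec, ih, pvG]
    by_cases h : (PySem.Chars.isalpha c && pvPunct n) = true <;> simp [h]

theorem pvA_loop (cs : List Char) (k j : Nat) (acc : List Char)
    (hk : j + k = cs.length) :
    (PySem.List.pyRange (j : Int) (cs.length : Int) 1).foldl (fun acc i =>
      if i < (cs.length : Int) - 1
          ∧ PySem.Chars.isalpha (PySem.List.pyGetD cs i ' ') = true
          ∧ pvPunct (PySem.List.pyGetD cs (i + 1) ' ') = true then
        acc ++ [PySem.List.pyGetD cs i ' ', ' ']
      else
        acc ++ [PySem.List.pyGetD cs i ' ']) acc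
    = acc ++ pvSpec (cs.drop j) := by
  induction k generalizing j acc with
  | zero =>
    rw [PySem.List.pyRange_one_eq_nil (by omega),
        List.drop_eq_nil_of_le (by omega : cs.length ≤ j)]
    simp [pvSpec]
  | succ m ih =>
    have hj : j < cs.length := by omega
    rw [PySem.List.pyRange_one_cons (by exact_mod_cast hj)]
    simp only [List.foldl_cons]
    have hcast : ((j : Int) + 1) = ((j + 1 : Nat) : Int) := by push_cast; ring
    rw [hcast]
    have hget : PySem.List.pyGetD cs ((j : Nat) : Int) ' ' = cs[j] := by
      rw [PySem.List.pyGetD_natCast]; exact List.getD_eq_getElem _ _ hj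
    rw [hget, List.drop_eq_getElem_cons hj]
    by_cases hlast : j + 1 < cs.length
    · have hget1 : PySem.List.pyGetD cs (((j + 1 : Nat)) : Int) ' ' = cs[j + 1] := by
        rw [PySem.List.pyGetD_natCast]; exact List.getD_eq_getElem _ _ hlast
      rw [hget1]
      rw [List.drop_eq_getElem_cons hlast, pvSpec, ← List.drop_eq_getElem_cons hlast]
      by_cases hb : (PySem.Chars.isalpha cs[j] && pvPunct cs[j + 1]) = true
      · rw [if_pos ⟨by omega, (Bool.and_eq_true _ _).mp hb |>.1,
              (Bool.and_eq_true _ _).mp hb |>.2⟩]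
        rw [ih (j + 1) _ (by omega)]
        simp [hb, List.append_assoc]
      · rw [if_neg (by
          rintro ⟨-, h1, h2⟩
          exact hb ((Bool.and_eq_true _ _).mpr ⟨h1, h2⟩))]
        rw [ih (j + 1) _ (by omega)]
        simp [hb, List.append_assoc]
    · rw [if_neg (by rintro ⟨h, -, -⟩; omega)]
      rw [ih (j + 1) _ (by omega)]
      rw [List.drop_eq_nil_of_le (by omega : cs.length ≤ j + 1)]
      simp [pvSpec]

-- invariant of B's backward splice loop
theorem pvB_loop (cs : List Char) (j : Nat) (hj : j < cs.length) :
    (PySem.List.pyRange ((j : Nat) : Int) 0 (-1)).foldl (fun acc i =>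
      if pvPunct (PySem.List.pyGetD cs i ' ') = true
          ∧ PySem.Chars.isalpha (PySem.List.pyGetD cs (i - 1) ' ') = true then
        PySem.List.slice acc none (some i) ++ [' '] ++ PySem.List.slice acc (some i) none
      else acc)
      (cs.take (j + 1) ++ pvG cs[j] (cs.drop (j + 1)))
    = cs.take 1 ++ pvG (cs[0]'(by omega)) (cs.drop 1) := by
  induction j with
  | zero =>
    rw [PySem.List.pyRange_neg_one_eq_nil (by omega)]
    simp
  | succ m ih =>
    have hm : m < cs.length := by omega
    rw [PySem.List.pyRange_neg_one_cons (by exact_mod_cast Nat.succ_pos m)]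
    simp only [List.foldl_cons]
    have hget : PySem.List.pyGetD cs (((m + 1 : Nat)) : Int) ' ' = cs[m + 1] := by
      rw [PySem.List.pyGetD_natCast]; exact List.getD_eq_getElem _ _ hj
    have hcast : ((m + 1 : Nat) : Int) - 1 = ((m : Nat) : Int) := by push_cast; ring
    have hget1 : PySem.List.pyGetD cs (((m + 1 : Nat) : Int) - 1) ' ' = cs[m] := by
      rw [hcast, PySem.List.pyGetD_natCast]; exact List.getD_eq_getElem _ _ hm
    rw [hget, hget1]
    set acc := cs.take (m + 1 + 1) ++ pvG cs[m + 1] (cs.drop (m + 1 + 1)) with hacc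
    have hlen : (cs.take (m + 1 + 1)).length = m + 1 + 1 := List.length_take_of_le (by omega)
    have htake : PySem.List.slice acc none (some ((m + 1 : Nat) : Int)) = cs.take (m + 1) := by
      rw [PySem.List.slice_to_natCast, hacc, List.take_append_of_le_length (by omega),
          List.take_take]
      simp
    have hdrop : PySem.List.slice acc (some ((m + 1 : Nat) : Int)) none
        = cs[m + 1] :: pvG cs[m + 1] (cs.drop (m + 1 + 1)) := by
      rw [PySem.List.slice_from_natCast, hacc, List.drop_append_of_le_length (by omega)]
      have : (cs.take (m + 1 + 1)).drop (m + 1) = [cs[m + 1]] := by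
        rw [List.drop_take]
        have h1 : m + 1 + 1 - (m + 1) = 1 := by omega
        rw [h1, List.take_one_drop_eq_of_lt_length hj]
        rfl
      simp [this]
    have hstep : ∀ b : Bool,
        (PySem.Chars.isalpha cs[m] && pvPunct cs[m + 1]) = b →
        (if pvPunct cs[m + 1] = true ∧ PySem.Chars.isalpha cs[m] = true then
          PySem.List.slice acc none (some ((m + 1 : Nat) : Int)) ++ [' ']
            ++ PySem.List.slice acc (some ((m + 1 : Nat) : Int)) none
        else acc)
        = cs.take (m + 1) ++ pvG cs[m] (cs.drop (m + 1)) := by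
      intro b hb
      rw [List.drop_eq_getElem_cons hj, pvG]
      cases b with
      | true =>
        obtain ⟨h1, h2⟩ := (Bool.and_eq_true _ _).mp hb
        rw [if_pos ⟨h2, h1⟩, htake, hdrop, hb]
        simp
      | false =>
        rw [if_neg (by
          rintro ⟨h2, h1⟩
          simp [h1, h2] at hb), hacc]
        rw [hb]
        have hsplit : cs.take (m + 1 + 1) = cs.take (m + 1) ++ [cs[m + 1]] := by
          rw [List.take_add_one, List.getElem?_eq_getElem hj]; rfl
        rw [hsplit, List.append_assoc]
        rfl
    rw [hstep _ rfl, hcast]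
    exact ih hm

-- ===== VERDICT (by name: the statement is the Claim_ definition above) =====
theorem fix_punctuation_spec : Claim_equal_fix_punctuation := by
  intro text _
  show fix_punctuation text = fix_punctuation_alt text
  simp only [fix_punctuation, fix_punctuation_alt]
  have hA := pvA_loop text.toList text.toList.length 0 [] (by omega)
  simp only [Nat.cast_zero, List.drop_zero, List.nil_append] at hA
  rw [hA]
  rcases List.eq_nil_or_concat' text.toList with hnil | _
  · rw [hnil]
    rw [PySem.List.pyRange_neg_one_eq_nil (by norm_num)]
    simp [pvSpec]
  · have hne : text.toList ≠ [] := by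
      rename_i h; obtain ⟨l, a, hl⟩ := h; simp [hl]
    obtain ⟨c, t, hcs⟩ := List.exists_cons_of_ne_nil hne
    rw [hcs]
    have hj : t.length < (c :: t).length := by simp
    have hB := pvB_loop (c :: t) t.length hj
    have hinit : (c :: t).take (t.length + 1) ++ pvG (c :: t)[t.length] ((c :: t).drop (t.length + 1))
        = c :: t := by
      rw [List.take_of_length_le (by simp), List.drop_eq_nil_of_le (by simp)]
      simp [pvG]
    rw [hinit] at hB
    have hcast : ((c :: t).length : Int) - 1 = ((t.length : Nat) : Int) := by
      simp
    rw [hcast, hB]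
    congr 1
    rw [pvSpec_cons]
    simp
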